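-- pv_equiv track=rewrite | github.com/Ka-raS/School-Code | Nam 2 Ky 2 - Lap trinh Python/251. NGƯỠNG TỐI THIỂU.py | split_count
-- ===== SOURCE A (Python) =====
-- from collections import Counter
-- from typing import List, Tuple
--
-- def split_count(sequence: str, length: int, min_count: int) -> List[Tuple[str, int]]:
--     counter: Counter[str, int] = Counter()
--     for i in range(0, len(sequence) - length + 1, length):
--         counter[sequence[i:i+length]] += 1
--
--     result: List[Tuple[str, int]] = []
--     for sub_sequence, count in counter.items():
--         if count >= min_count:
--             result.append((sub_sequence, count))
--
--     result.sort()
--     return result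
-- ===== SOURCE B (Python) =====
-- def split_count(sequence, length, min_count):
--     chunks = sorted(sequence[i:i+length]
--                     for i in range(0, len(sequence) - length + 1, length))
--     result = []
--     i, n = 0, len(chunks)
--     while i < n:
--         j = i + 1
--         while j < n and chunks[j] == chunks[i]:
--             j += 1
--         if j - i >= min_count:
--             result.append((chunks[i], j - i))
--         i = j
--     return result
-- ===== Notes on version B (the rewrite author's own statement) =====
-- stated objective: alternative
-- what changed: Replaces the Counter-then-filter-then-final-sort pipeline by sorting the chunk list once and emitting (chunk, run_length) pairs in a single run-length pass over the sorted chunks, with no dictionary and no final sort.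
import Mathlib
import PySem

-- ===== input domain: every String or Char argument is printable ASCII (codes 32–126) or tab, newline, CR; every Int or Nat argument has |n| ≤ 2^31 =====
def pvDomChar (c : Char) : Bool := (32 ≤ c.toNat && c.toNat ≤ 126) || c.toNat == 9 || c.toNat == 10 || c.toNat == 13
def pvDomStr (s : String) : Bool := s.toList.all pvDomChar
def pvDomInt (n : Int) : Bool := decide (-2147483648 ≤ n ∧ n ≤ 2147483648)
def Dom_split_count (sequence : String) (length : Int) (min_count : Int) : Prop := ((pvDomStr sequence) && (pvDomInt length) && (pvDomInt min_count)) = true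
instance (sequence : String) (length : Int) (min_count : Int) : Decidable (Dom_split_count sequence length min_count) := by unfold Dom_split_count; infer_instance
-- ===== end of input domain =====

-- B replaces A's Counter + filter + final tuple-sort by sorting the chunk list once and
-- emitting (chunk, run length) pairs in one run-length pass over the sorted chunks (alternative decomposition, similar cost).


-- ===== PORT A =====
-- literal transliteration of Source A: Counter over fixed-step chunks, filter by min_count, sort the pairs
def split_count (sequence : String) (length : Int) (min_count : Int) : List (String × Int) :=
  let counter : PySem.Dict String Int :=
    (PySem.List.pyRange 0 (PySem.Str.len sequence - length + 1) length).foldl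
      (fun d i => d.modify (PySem.Str.slice sequence (some i) (some (i + length))) 0 (· + 1))
      PySem.Dict.empty
  let result : List (String × Int) :=
    counter.items.foldl (fun r sc => if min_count ≤ sc.2 then r ++ [sc] else r) []
  PySem.List.sorted2 result Prod.fst Prod.snd false

-- ===== PORT B =====
-- the run-length pass of Source B (outer while = one step per run; inner while = takeWhile/dropWhile on the suffix)
def pvRuns (min_count : Int) : List String → List (String × Int)
  | [] => []
  | c :: rest =>
    if min_count ≤ 1 + ((rest.takeWhile (fun x => x == c)).length : Int) then
      (c, 1 + ((rest.takeWhile (fun x => x == c)).length : Int)) ::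
        pvRuns min_count (rest.dropWhile (fun x => x == c))
    else
      pvRuns min_count (rest.dropWhile (fun x => x == c))
  termination_by l => l.length
  decreasing_by
    · exact Nat.lt_succ_of_le (List.length_dropWhile_le _ _)
    · exact Nat.lt_succ_of_le (List.length_dropWhile_le _ _)

-- literal transliteration of Source B: build the chunk list, sort it, run-length scan
def split_count_alt (sequence : String) (length : Int) (min_count : Int) : List (String × Int) :=
  let chunks : List String :=
    (PySem.List.pyRange 0 (PySem.Str.len sequence - length + 1) length).map
      (fun i => PySem.Str.slice sequence (some i) (some (i + length)))
  pvRuns min_count (PySem.List.sorted chunks (fun s => s) false)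

-- ===== PRECONDITION & SPEC =====
-- Pre_ excludes only length = 0, where A raises ValueError (range step 0); A returns on every other input.
def Pre_split_count (sequence : String) (length : Int) (min_count : Int) : Prop := length ≠ 0
instance (sequence : String) (length : Int) (min_count : Int) : Decidable (Pre_split_count sequence length min_count) := by unfold Pre_split_count; infer_instance
def pvWitness_split_count : String × Int × Int := ("aabbaa", 2, 2)

def Spec_split_count (sequence : String) (length : Int) (min_count : Int) (out : List (String × Int)) : Prop := out = split_count_alt sequence length min_count
instance (sequence : String) (length : Int) (min_count : Int) (out : List (String × Int)) : Decidable (Spec_split_count sequence length min_count out) := by unfold Spec_split_count; infer_instance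

-- ===== CLAIM (what is proved, stated in full; the proofs are below) =====
def Claim_equal_split_count : Prop := ∀ (sequence : String) (length : Int) (min_count : Int), Dom_split_count sequence length min_count → Pre_split_count sequence length min_count → Spec_split_count sequence length min_count (split_count sequence length min_count)

-- ===== LEMMAS AND PROOFS =====

theorem pv_insertBy_congr {α : Type} (f g : α → α → Bool) (x : α) (acc : List α)
    (h : ∀ b ∈ acc, f x b = g x b) :
    PySem.List.insertBy f x acc = PySem.List.insertBy g x acc := by
  induction acc with
  | nil => rfl
  | cons y ys ih =>
    simp only [PySem.List.insertBy]
    rw [h y (List.mem_cons_self ..)]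
    by_cases hg : g x y = true
    · simp [hg]
    · simp only [hg, if_neg, Bool.false_eq_true, not_false_eq_true]
      rw [ih (fun b hb => h b (List.mem_cons_of_mem _ hb))]

theorem pv_foldl_insertBy_congr {α : Type} (u : List α) (f g : α → α → Bool)
    (h : ∀ a ∈ u, ∀ b ∈ u, f a b = g a b) :
    ∀ (l acc : List α), (∀ a ∈ l, a ∈ u) → (∀ a ∈ acc, a ∈ u) →
      l.foldl (fun a x => PySem.List.insertBy f x a) acc
        = l.foldl (fun a x => PySem.List.insertBy g x a) acc := by
  intro l
  induction l with
  | nil => intro acc _ _; rfl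
  | cons x xs ih =>
    intro acc hl hacc
    have hx : x ∈ u := hl x (List.mem_cons_self ..)
    simp only [List.foldl_cons]
    rw [pv_insertBy_congr f g x acc (fun b hb => h x hx b (hacc b hb))]
    exact ih _ (fun a ha => hl a (List.mem_cons_of_mem _ ha))
      (fun a ha => by
        rcases (PySem.List.mem_insertBy _ _ _ _).1 ha with rfl | ha'
        · exact hx
        · exact hacc a ha')

theorem pv_sorted2_fst (xs : List (String × Int)) (h : (xs.map Prod.fst).Nodup) :
    PySem.List.sorted2 xs Prod.fst Prod.snd false = PySem.List.sorted xs Prod.fst false := by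
  simp only [PySem.List.sorted2, PySem.List.sorted]
  apply pv_foldl_insertBy_congr xs _ _ _ xs [] (fun a ha => ha) (fun a ha => by simp at ha)
  intro a ha b hb
  by_cases hab : a.1 = b.1
  · have : a = b := List.inj_on_of_nodup_map h ha hb hab
    subst this
    simp
  · rcases lt_trichotomy a.1 b.1 with hlt | heq | hgt
    · simp [hlt]
    · exact absurd heq hab
    · simp [hgt, not_lt_of_gt hgt]

theorem pv_tail_facts (c : String) (rest : List String) (hp : (c :: rest).Pairwise (· ≤ ·)) :
    (rest.dropWhile (fun x => x == c)).Pairwise (· ≤ ·) ∧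
    (∀ x ∈ rest.dropWhile (fun x => x == c), c < x) ∧
    (∀ x ∈ rest.takeWhile (fun x => x == c), x = c) := by
  rw [List.pairwise_cons] at hp
  obtain ⟨hle, hpr⟩ := hp
  have htake : ∀ x ∈ rest.takeWhile (fun x => x == c), x = c := by
    intro x hx
    have := List.mem_takeWhile_imp hx
    simpa using this
  have hpw : (rest.dropWhile (fun x => x == c)).Pairwise (· ≤ ·) :=
    hpr.sublist (List.dropWhile_sublist _)
  have hcnot : c ∉ rest.dropWhile (fun x => x == c) := by
    intro hc
    have hne : rest.dropWhile (fun x => x == c) ≠ [] := List.ne_nil_of_mem hc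
    have hhead : ¬ ((fun x => x == c) ((rest.dropWhile (fun x => x == c)).head hne) = true) := by
      simpa using List.head_dropWhile_not (fun x => x == c) hne
    have hheadne : (rest.dropWhile (fun x => x == c)).head hne ≠ c := by simpa using hhead
    have hheadmem : (rest.dropWhile (fun x => x == c)).head hne ∈ rest :=
      (List.dropWhile_sublist _).mem (List.head_mem hne)
    have h1 : c ≤ (rest.dropWhile (fun x => x == c)).head hne := hle _ hheadmem
    obtain ⟨h0, t, heq⟩ := List.exists_cons_of_ne_nil hne
    have hh0 : (rest.dropWhile (fun x => x == c)).head hne = h0 := by simp [heq]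
    rw [heq] at hc hpw
    rw [hh0] at hheadne h1
    have h2 : h0 ≤ c := by
      rcases List.mem_cons.1 hc with h | h
      · exact absurd h.symm hheadne
      · exact List.rel_of_pairwise_cons hpw h
    exact hheadne (le_antisymm h2 h1)
  refine ⟨hpw, ?_, htake⟩
  intro x hx
  have hxr : x ∈ rest := (List.dropWhile_sublist _).mem hx
  exact lt_of_le_of_ne (hle x hxr) (fun h => hcnot (h ▸ hx))

theorem pv_count_head (c : String) (rest : List String) (hp : (c :: rest).Pairwise (· ≤ ·)) :
    ((c :: rest).count c : Int) = 1 + ((rest.takeWhile (fun x => x == c)).length : Int) := by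
  obtain ⟨_, hlt, htake⟩ := pv_tail_facts c rest hp
  have h1 : rest.count c = (rest.takeWhile (fun x => x == c)).length := by
    conv_lhs => rw [← List.takeWhile_append_dropWhile (p := fun x => x == c) (l := rest)]
    rw [List.count_append]
    have ht : (rest.takeWhile (fun x => x == c)).count c = (rest.takeWhile (fun x => x == c)).length :=
      List.count_eq_length.2 (fun b hb => (htake b hb).symm)
    have hd : (rest.dropWhile (fun x => x == c)).count c = 0 :=
      List.count_eq_zero.2 (fun h => absurd rfl (ne_of_gt (hlt c h)))
    omega
  rw [List.count_cons_self]
  omega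

theorem pv_count_ne (c s : String) (rest : List String) (hs : s ≠ c)
    (htake : ∀ x ∈ rest.takeWhile (fun x => x == c), x = c) :
    (c :: rest).count s = (rest.dropWhile (fun x => x == c)).count s := by
  rw [List.count_cons, if_neg (by simpa using Ne.symm hs)]
  conv_lhs => rw [← List.takeWhile_append_dropWhile (p := fun x => x == c) (l := rest)]
  rw [List.count_append]
  have : (rest.takeWhile (fun x => x == c)).count s = 0 :=
    List.count_eq_zero.2 (fun h => hs (htake s h))
  omega

theorem pv_runs_mem (m : Int) : ∀ (l : List String), l.Pairwise (· ≤ ·) →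
    ∀ s k, ((s, k) ∈ pvRuns m l ↔ s ∈ l ∧ k = (l.count s : Int) ∧ m ≤ k) := by
  intro l
  induction l using pvRuns.induct m with
  | case1 => intro _ s k; simp [pvRuns]
  | case2 c rest hif ih =>
    intro hp s k
    obtain ⟨hpw, hlt, htake⟩ := pv_tail_facts c rest hp
    rw [pvRuns, if_pos hif]
    by_cases hs : s = c
    · subst hs
      have hcount := pv_count_head s rest hp
      have hnot : (s, k) ∉ pvRuns m (rest.dropWhile (fun x => x == s)) := by
        intro hmem
        have := ((ih hpw s k).1 hmem).1
        exact absurd rfl (ne_of_gt (hlt s this))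
      constructor
      · intro hmem
        rcases List.mem_cons.1 hmem with h | hmem'
        · injection h with h1 h2
          exact ⟨List.mem_cons_self .., by omega, by omega⟩
        · exact absurd hmem' hnot
      · rintro ⟨-, hk, hm⟩
        exact List.mem_cons.2 (Or.inl (by rw [Prod.mk.injEq]; exact ⟨rfl, by omega⟩))
    · rw [List.mem_cons, ih hpw s k]
      have hcount := pv_count_ne c s rest hs htake
      have hmemiff : s ∈ c :: rest ↔ s ∈ rest.dropWhile (fun x => x == c) := by
        rw [List.mem_cons]
        constructor
        · rintro (rfl | hr)
          · exact absurd rfl hs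
          · conv at hr => rw [← List.takeWhile_append_dropWhile (p := fun x => x == c) (l := rest)]
            rcases List.mem_append.1 hr with h | h
            · exact absurd (htake s h) hs
            · exact h
        · intro h; exact .inr ((List.dropWhile_sublist _).mem h)
      constructor
      · rintro (h | ⟨h1, h2, h3⟩)
        · exact absurd (Prod.mk.injEq .. ▸ h).1 hs
        · exact ⟨hmemiff.2 h1, by omega, h3⟩
      · rintro ⟨h1, h2, h3⟩
        exact .inr ⟨hmemiff.1 h1, by omega, h3⟩
  | case3 c rest hif ih =>
    intro hp s k
    obtain ⟨hpw, hlt, htake⟩ := pv_tail_facts c rest hp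
    rw [pvRuns, if_neg hif]
    by_cases hs : s = c
    · subst hs
      have hcount := pv_count_head s rest hp
      constructor
      · intro hmem
        exact absurd rfl (ne_of_gt (hlt s ((ih hpw s k).1 hmem).1))
      · rintro ⟨-, rfl, hm⟩
        omega
    · rw [ih hpw s k]
      have hcount := pv_count_ne c s rest hs htake
      have hmemiff : s ∈ c :: rest ↔ s ∈ rest.dropWhile (fun x => x == c) := by
        rw [List.mem_cons]
        constructor
        · rintro (rfl | hr)
          · exact absurd rfl hs
          · conv at hr => rw [← List.takeWhile_append_dropWhile (p := fun x => x == c) (l := rest)]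
            rcases List.mem_append.1 hr with h | h
            · exact absurd (htake s h) hs
            · exact h
        · intro h; exact .inr ((List.dropWhile_sublist _).mem h)
      constructor
      · rintro ⟨h1, h2, h3⟩; exact ⟨hmemiff.2 h1, by omega, h3⟩
      · rintro ⟨h1, h2, h3⟩; exact ⟨hmemiff.1 h1, by omega, h3⟩

theorem pv_runs_pairwise (m : Int) : ∀ (l : List String), l.Pairwise (· ≤ ·) →
    (pvRuns m l).Pairwise (fun a b => a.1 < b.1) := by
  intro l
  induction l using pvRuns.induct m with
  | case1 => intro _; simp [pvRuns]
  | case2 c rest hif ih =>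
    intro hp
    obtain ⟨hpw, hlt, htake⟩ := pv_tail_facts c rest hp
    rw [pvRuns, if_pos hif]
    refine List.pairwise_cons.2 ⟨?_, ih hpw⟩
    intro y hy
    exact hlt y.1 (((pv_runs_mem m _ hpw y.1 y.2).1 hy).1)
  | case3 c rest hif ih =>
    intro hp
    obtain ⟨hpw, _, _⟩ := pv_tail_facts c rest hp
    rw [pvRuns, if_neg hif]
    exact ih hpw

-- ===== VERDICT (by name: the statement is the Claim_ definition above) =====
theorem split_count_spec : Claim_equal_split_count := by
  intro seq length m hdom hpre
  unfold Spec_split_count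
  simp only [split_count, split_count_alt]
  set chunks : List String :=
    (PySem.List.pyRange 0 (PySem.Str.len seq - length + 1) length).map
      (fun i => PySem.Str.slice seq (some i) (some (i + length))) with hchunks
  have hA1 : (PySem.List.pyRange 0 (PySem.Str.len seq - length + 1) length).foldl
      (fun d i => d.modify (PySem.Str.slice seq (some i) (some (i + length))) 0 (· + 1))
      PySem.Dict.empty = PySem.Dict.counter chunks := by
    rw [PySem.Dict.counter_eq_foldl, hchunks, List.foldl_map]
  rw [hA1, PySem.Dict.items_counter]
  have hA2 : ((PySem.Set.ofList chunks).map (fun k => (k, (chunks.count k : Int)))).foldl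
      (fun r sc => if m ≤ sc.2 then r ++ [sc] else r) []
      = ((PySem.Set.ofList chunks).map (fun k => (k, (chunks.count k : Int)))).filter
          (fun sc => decide (m ≤ sc.2)) := by
    have := PySem.List.foldl_append_if (fun sc : String × Int => decide (m ≤ sc.2)) id
      ((PySem.Set.ofList chunks).map (fun k => (k, (chunks.count k : Int)))) []
    simpa using this
  rw [hA2]
  set xs : List (String × Int) :=
    ((PySem.Set.ofList chunks).map (fun k => (k, (chunks.count k : Int)))).filter
      (fun sc => decide (m ≤ sc.2)) with hxs
  set l : List String := PySem.List.sorted chunks (fun s => s) false with hl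
  have hlpw : l.Pairwise (· ≤ ·) := by
    simpa using PySem.List.sorted_pairwise chunks (fun s => s)
  have hlperm : l.Perm chunks := PySem.List.sorted_perm chunks _ false
  set ys : List (String × Int) := pvRuns m l with hys
  have hys_pw : ys.Pairwise (fun a b => a.1 < b.1) := pv_runs_pairwise m l hlpw
  have hys_nodup : ys.Nodup := hys_pw.imp (fun h he => absurd (he ▸ h) (lt_irrefl _))
  have h0 : (((PySem.Set.ofList chunks).map (fun k => (k, (chunks.count k : Int)))).map Prod.fst)
      = (PySem.Set.ofList chunks : List String) := by
    simp [List.map_map, Function.comp_def]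
  have hxs_fst_nodup : (xs.map Prod.fst).Nodup := by
    refine List.Nodup.sublist (List.Sublist.map Prod.fst List.filter_sublist) ?_
    rw [h0]
    exact PySem.Set.nodup_ofList chunks
  have hxs_nodup : xs.Nodup := hxs_fst_nodup.of_map
  have hmem : ∀ a : String × Int, a ∈ ys ↔ a ∈ xs := by
    rintro ⟨s, k⟩
    rw [hys, pv_runs_mem m l hlpw s k]
    rw [hxs]
    simp only [List.mem_filter, List.mem_map, PySem.Set.mem_ofList, Prod.mk.injEq,
      decide_eq_true_eq]
    constructor
    · rintro ⟨h1, rfl, h3⟩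
      exact ⟨⟨s, hlperm.mem_iff.1 h1, rfl, by rw [hlperm.count_eq]⟩, h3⟩
    · rintro ⟨⟨x, hx1, rfl, rfl⟩, h2⟩
      exact ⟨hlperm.mem_iff.2 hx1, by rw [hlperm.count_eq], h2⟩
  have hperm : ys.Perm xs := (List.perm_ext_iff_of_nodup hys_nodup hxs_nodup).2 hmem
  rw [pv_sorted2_fst xs hxs_fst_nodup]
  exact PySem.List.sorted_eq_of_perm_of_pairwise_lt xs ys Prod.fst hperm hys_pw
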